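-- pv_equiv track=rewrite | github.com/mirojs/graphrag-orchestration | src/worker/hybrid_v2/pipeline/enhanced_graph_retriever.py | _sanitize_query_for_fulltext
-- ===== SOURCE A (Python) =====
-- from typing import Any, Dict, List, Optional, Tuple
--
-- def _sanitize_query_for_fulltext(query: str) -> str:
--     """Sanitize input for Neo4j Lucene fulltext index.
--
--     Mirrors the basic approach in the hybrid orchestrator: keep alphanumerics
--     and whitespace only, replacing other characters with spaces.
--     """
--
--     if not query:
--         return ""
--     out: List[str] = []
--     for ch in query:
--         if ch.isalnum() or ch.isspace():
--             out.append(ch)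
--         else:
--             out.append(" ")
--     return " ".join("".join(out).split())
-- ===== SOURCE B (Python) =====
-- def _sanitize_query_for_fulltext(query: str) -> str:
--     """Single-pass tokenizer: collect maximal alphanumeric runs, join with spaces."""
--     words = []
--     buf = []
--     for ch in query:
--         if ch.isalnum():
--             buf.append(ch)
--         else:
--             if buf:
--                 words.append(''.join(buf))
--                 buf = []
--     if buf:
--         words.append(''.join(buf))
--     return ' '.join(words)
-- ===== Notes on version B (the rewrite author's own statement) =====
-- stated objective: alternative
-- what changed: Replaces A's three-stage pipeline (map every non-alnum/space char to ' ', build an intermediate string, then split/re-join) with a single-pass tokenizer that buffers alphanumeric runs and flushes them as words on any other character.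
import Mathlib
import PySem

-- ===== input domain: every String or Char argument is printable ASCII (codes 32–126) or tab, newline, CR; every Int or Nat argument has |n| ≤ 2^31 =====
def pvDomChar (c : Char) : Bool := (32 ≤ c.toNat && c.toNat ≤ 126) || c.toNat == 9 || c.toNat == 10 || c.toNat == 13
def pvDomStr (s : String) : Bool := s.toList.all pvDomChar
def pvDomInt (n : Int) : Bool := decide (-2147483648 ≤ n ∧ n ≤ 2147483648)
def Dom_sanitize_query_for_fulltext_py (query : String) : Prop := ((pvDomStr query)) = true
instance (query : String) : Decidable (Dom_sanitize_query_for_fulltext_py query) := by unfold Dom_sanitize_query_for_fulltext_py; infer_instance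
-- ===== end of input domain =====

-- B replaces A's map-then-split/re-join pipeline with a single-pass tokenizer (alternative decomposition, same cost).

-- ===== PORT A =====
-- A: if not query: return ""; map each char (keep alnum/space, else ' '), then ' '.join(mapped.split())
def sanitize_query_for_fulltext_py (query : String) : String :=
  if query.toList.isEmpty then ""
  else
    let out : List Char := query.toList.foldl
      (fun acc ch => acc ++ [if PySem.Chars.isalnum ch || PySem.Chars.isspace ch then ch else ' ']) []
    String.mk (PySem.Chars.join [' '] (PySem.Chars.split₀ out))

-- ===== PORT B =====
-- B: one pass; buffer alnum chars, flush buffer as a word on any other char, flush at end, join with ' '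
def sanitize_query_for_fulltext_py_alt (query : String) : String :=
  let st := query.toList.foldl
    (fun (s : List Char × List (List Char)) ch =>
      if PySem.Chars.isalnum ch then (s.1 ++ [ch], s.2)
      else if s.1.isEmpty then s else ([], s.2 ++ [s.1]))
    ([], [])
  let words := if st.1.isEmpty then st.2 else st.2 ++ [st.1]
  String.mk (PySem.Chars.join [' '] words)

-- ===== PRECONDITION & SPEC =====
def Spec_sanitize_query_for_fulltext_py (query : String) (out : String) : Prop := out = sanitize_query_for_fulltext_py_alt query
instance (query : String) (out : String) : Decidable (Spec_sanitize_query_for_fulltext_py query out) := by unfold Spec_sanitize_query_for_fulltext_py; infer_instance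

-- ===== CLAIM (what is proved, stated in full; the proofs are below) =====
def Claim_equal_sanitize_query_for_fulltext_py : Prop := ∀ (query : String), Dom_sanitize_query_for_fulltext_py query → Spec_sanitize_query_for_fulltext_py query (sanitize_query_for_fulltext_py query)

-- ===== LEMMAS AND PROOFS =====

-- alphanumeric and whitespace characters are disjoint (for every Char)
theorem pv_alnum_not_space (c : Char) (h : PySem.Chars.isalnum c = true) :
    PySem.Chars.isspace c = false := by
  simp only [PySem.Chars.isalnum, PySem.Chars.isalpha, PySem.Chars.isdigit, PySem.Chars.isspace,
    PySem.Chars.isupper, PySem.Chars.islower, Char.le_def, UInt32.le_iff_toNat_le, Char.toNat] at *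
  simp_all
  omega

-- A's sanitizing map of one character
def pvSan (ch : Char) : Char :=
  if PySem.Chars.isalnum ch || PySem.Chars.isspace ch then ch else ' '

theorem pv_isspace_san (c : Char) : PySem.Chars.isspace (pvSan c) = !PySem.Chars.isalnum c := by
  unfold pvSan
  by_cases h : PySem.Chars.isalnum c = true
  · simp [h, pv_alnum_not_space c h]
  · simp at h
    by_cases hs : PySem.Chars.isspace c = true
    · simp [h, hs]
    · simp [h, hs]; decide

theorem pv_san_of_alnum (c : Char) (h : PySem.Chars.isalnum c = true) : pvSan c = c := by
  simp [pvSan, h]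

-- A's appending foldl builds the mapped list
theorem pv_foldl_map (f : Char → Char) (cs : List Char) (acc : List Char) :
    cs.foldl (fun a c => a ++ [f c]) acc = acc ++ cs.map f := by
  induction cs generalizing acc with
  | nil => simp
  | cons c cs ih => simp [List.foldl_cons, ih, List.append_assoc]

-- B's fold step and final flush
def pvStep (s : List Char × List (List Char)) (ch : Char) : List Char × List (List Char) :=
  if PySem.Chars.isalnum ch then (s.1 ++ [ch], s.2)
  else if s.1.isEmpty then s else ([], s.2 ++ [s.1])

def pvFlush (s : List Char × List (List Char)) : List (List Char) :=
  if s.1.isEmpty then s.2 else s.2 ++ [s.1]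

-- splitting A's mapped string is exactly B's tokenizer loop
theorem pv_go_eq_fold (cs : List Char) (cur : List Char) (acc : List (List Char)) :
    PySem.Chars.split₀.go (cs.map pvSan) cur acc
      = pvFlush (cs.foldl pvStep (cur.reverse, acc.reverse)) := by
  induction cs generalizing cur acc with
  | nil =>
    simp only [List.map_nil, PySem.Chars.split₀.go, pvFlush, List.foldl_nil]
    by_cases h : cur.isEmpty = true <;> simp_all
  | cons c cs ih =>
    simp only [List.map_cons, PySem.Chars.split₀.go, List.foldl_cons]
    by_cases ha : PySem.Chars.isalnum c = true
    · have hs : PySem.Chars.isspace (pvSan c) = false := by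
        rw [pv_isspace_san]; simp [ha]
      rw [if_neg (by simp [hs]), pv_san_of_alnum c ha]
      have := ih (c :: cur) acc
      simp only [List.reverse_cons] at this
      rw [this, show pvStep (cur.reverse, acc.reverse) c = (cur.reverse ++ [c], acc.reverse) by
        simp [pvStep, ha]]
    · have hs : PySem.Chars.isspace (pvSan c) = true := by
        rw [pv_isspace_san]; simp [ha]
      rw [if_pos hs]
      by_cases hc : cur.isEmpty = true
      · have hcur : cur = [] := by simpa [List.isEmpty_iff] using hc
        subst hcur
        simp only [List.isEmpty_nil, if_true]
        have := ih [] acc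
        simp only [List.reverse_nil] at this
        rw [this]
        simp [pvStep, ha]
      · simp only [hc, Bool.false_eq_true, if_false]
        have := ih [] (cur.reverse :: acc)
        simp only [List.reverse_nil, List.reverse_cons] at this
        rw [this]
        have hcur' : cur.reverse.isEmpty = false := by
          simp [List.isEmpty_iff] at hc ⊢; exact hc
        simp [pvStep, ha, hcur']

-- ===== VERDICT (by name: the statement is the Claim_ definition above) =====
theorem sanitize_query_for_fulltext_py_spec : Claim_equal_sanitize_query_for_fulltext_py := by
  intro query _
  unfold Spec_sanitize_query_for_fulltext_py
  simp only [sanitize_query_for_fulltext_py, sanitize_query_for_fulltext_py_alt]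
  by_cases h : query.toList.isEmpty = true
  · have hnil : query.toList = [] := by simpa [List.isEmpty_iff] using h
    rw [if_pos h, hnil]
    simp [PySem.Chars.join]
    decide
  · rw [if_neg h]
    have hout : query.toList.foldl
        (fun acc ch => acc ++ [if PySem.Chars.isalnum ch || PySem.Chars.isspace ch then ch else ' ']) []
        = query.toList.map pvSan := by
      simpa [pvSan] using pv_foldl_map pvSan query.toList []
    rw [hout]
    have hsplit := pv_go_eq_fold query.toList [] []
    simp only [List.reverse_nil] at hsplit
    rw [show PySem.Chars.split₀ (query.toList.map pvSan)
          = PySem.Chars.split₀.go (query.toList.map pvSan) [] [] from rfl, hsplit]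
    rfl
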